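-- pv_equiv track=rewrite | github.com/wattaihei/ProgrammingContest | AtCoder/エイジング2020/probF.py | subnaive2
-- ===== SOURCE A (Python) =====
-- MAX = 5
--
-- mod = 10**9+7
--
-- def op(a, b):
--     return a*b % mod
--
-- def add(a, b):
--     return (a+b) % mod
--
-- def subnaive2(N):
--     dp = [0]*(N+1)
--     dp[0] = 1
--     for _ in range(MAX):
--         ndp = [0]*(N+1)
--         for i in range(N+1):
--             for j in range(i+1, N+1):
--                 ndp[j] = add(ndp[j], op(j-i, dp[i]))
--         dp = ndp
--     ret = [0]*(N+1)
--     for i in range(N+1):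
--         ret[i] = add(ret[i-1], dp[i])
--     return ret
-- ===== SOURCE B (Python) =====
-- MAX = 5
--
-- mod = 10**9+7
--
-- def subnaive2(N):
--     dp = [0]*(N+1)
--     dp[0] = 1
--     for _ in range(MAX):
--         # ndp[j] = sum_{i<j} (j-i)*dp[i]  computed with two running prefix sums
--         ndp = [0]
--         s1 = 0  # sum of dp[i], i < j  (mod)
--         s2 = 0  # sum of i*dp[i], i < j  (mod)
--         for j in range(1, N+1):
--             s1 = (s1 + dp[j-1]) % mod
--             s2 = (s2 + (j-1)*dp[j-1]) % mod
--             ndp.append((j*s1 - s2) % mod)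
--         dp = ndp
--     ret = []
--     acc = 0
--     for v in dp:
--         acc = (acc + v) % mod
--         ret.append(acc)
--     return ret
-- ===== Notes on version B (the rewrite author's own statement) =====
-- stated objective: faster
-- what changed: Each convolution layer is computed in one left-to-right pass keeping two running prefix sums (sum of dp values and sum of index-weighted dp values) so each new entry is a constant-time formula, replacing A's quadratic double loop; the final prefix-sum pass folds over dp directly.
import Mathlib
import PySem

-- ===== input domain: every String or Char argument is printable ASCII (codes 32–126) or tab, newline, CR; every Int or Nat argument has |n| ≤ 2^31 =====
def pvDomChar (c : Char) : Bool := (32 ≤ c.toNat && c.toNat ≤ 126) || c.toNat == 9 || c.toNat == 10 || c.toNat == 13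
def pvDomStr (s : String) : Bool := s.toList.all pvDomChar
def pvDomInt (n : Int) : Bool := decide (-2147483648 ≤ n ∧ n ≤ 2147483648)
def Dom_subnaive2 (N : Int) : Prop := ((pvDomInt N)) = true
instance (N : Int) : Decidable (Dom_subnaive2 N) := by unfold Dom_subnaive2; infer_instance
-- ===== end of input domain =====

-- B replaces A's O(N^2) inner double loop per layer by one pass with two running prefix
-- sums (sum dp[i] and sum i*dp[i]), so ndp[j] = (j*s1 - s2) % mod; measurably faster.

-- ===== PORT A =====
def pvMod : Int := 10^9+7

def pvOp (a b : Int) : Int := PySem.Int.mod (a * b) pvMod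

def pvAdd (a b : Int) : Int := PySem.Int.mod (a + b) pvMod

-- one iteration of A's outer 'for _ in range(MAX)' body (the nested i/j loops)
def pvLayerA (N : Int) (dp : List Int) : List Int :=
  (PySem.List.pyRange 0 (N+1) 1).foldl (fun ndp i =>
    (PySem.List.pyRange (i+1) (N+1) 1).foldl (fun n2 j =>
      PySem.List.pySetD n2 j (pvAdd (PySem.List.pyGetD n2 j 0) (pvOp (j - i) (PySem.List.pyGetD dp i 0)))) ndp)
    (List.replicate (N+1).toNat 0)

def subnaive2 (N : Int) : List Int :=
  let dp0 := PySem.List.pySetD (List.replicate (N+1).toNat 0) 0 1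
  let dp := (List.range 5).foldl (fun dp _ => pvLayerA N dp) dp0
  (PySem.List.pyRange 0 (N+1) 1).foldl (fun ret i =>
    PySem.List.pySetD ret i (pvAdd (PySem.List.pyGetD ret (i-1) 0) (PySem.List.pyGetD dp i 0)))
    (List.replicate (N+1).toNat 0)

-- ===== PORT B =====
-- one layer of B: a single pass keeping running sums s1 = Σ dp[i], s2 = Σ i*dp[i]
def pvLayerB (N : Int) (dp : List Int) : List Int :=
  ((PySem.List.pyRange 1 (N+1) 1).foldl (fun st j =>
      let s1 := PySem.Int.mod (st.2.1 + PySem.List.pyGetD dp (j-1) 0) pvMod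
      let s2 := PySem.Int.mod (st.2.2 + (j-1) * PySem.List.pyGetD dp (j-1) 0) pvMod
      (st.1 ++ [PySem.Int.mod (j * s1 - s2) pvMod], s1, s2))
    (([0], 0, 0) : List Int × Int × Int)).1

def subnaive2_alt (N : Int) : List Int :=
  let dp0 := PySem.List.pySetD (List.replicate (N+1).toNat 0) 0 1
  let dp := (List.range 5).foldl (fun dp _ => pvLayerB N dp) dp0
  (dp.foldl (fun st v =>
      let acc := PySem.Int.mod (st.2 + v) pvMod
      (st.1 ++ [acc], acc)) (([], 0) : List Int × Int)).1

-- ===== PRECONDITION & SPEC =====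
-- Pre_ excludes negative N, on which Python A raises IndexError (it writes into an empty list).
def Pre_subnaive2 (N : Int) : Prop := 0 ≤ N
instance (N : Int) : Decidable (Pre_subnaive2 N) := by unfold Pre_subnaive2; infer_instance
def pvWitness_subnaive2 : Int := (3)

def Spec_subnaive2 (N : Int) (out : List Int) : Prop := out = subnaive2_alt N
instance (N : Int) (out : List Int) : Decidable (Spec_subnaive2 N out) := by unfold Spec_subnaive2; infer_instance

-- ===== CLAIM (what is proved, stated in full; the proofs are below) =====
def Claim_equal_subnaive2 : Prop := ∀ (N : Int), Dom_subnaive2 N → Pre_subnaive2 N → Spec_subnaive2 N (subnaive2 N)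

-- ===== LEMMAS AND PROOFS =====

-- the per-layer mathematical value: entry m is (Σ_{i<m} (m-i)*dp[i]) mod p
def pvE (dp : List Int) (m : Nat) : Int :=
  (∑ i ∈ Finset.range m, (((m:Int) - (i:Int)) * dp.getD i 0)) % pvMod
-- prefix sums of dp and of i*dp[i]
def pvQ (dp : List Int) (m : Nat) : Int :=
  (∑ i ∈ Finset.range m, dp.getD i 0) % pvMod
def pvR (dp : List Int) (m : Nat) : Int :=
  (∑ i ∈ Finset.range m, ((i:Int) * dp.getD i 0)) % pvMod

lemma pvMod_pos : (0:Int) < pvMod := by norm_num [pvMod]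

lemma pv_mod_eq (a : Int) : PySem.Int.mod a pvMod = a % pvMod :=
  PySem.Int.mod_eq_emod_of_pos pvMod_pos

lemma pv_addm (a b : Int) : (a % pvMod + b) % pvMod = (a + b) % pvMod := by
  conv_lhs => rw [Int.add_emod, Int.emod_emod_of_dvd a dvd_rfl, ← Int.add_emod]

lemma pv_addm' (a b : Int) : (a + b % pvMod) % pvMod = (a + b) % pvMod := by
  rw [add_comm, pv_addm, add_comm]

lemma pv_mulsub (j S T : Int) :
    (j * (S % pvMod) - T % pvMod) % pvMod = (j * S - T) % pvMod := by
  have h1 : (j * (S % pvMod)) % pvMod = (j * S) % pvMod := by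
    rw [Int.mul_emod, Int.emod_emod_of_dvd S dvd_rfl, ← Int.mul_emod]
  rw [Int.sub_emod, h1, Int.emod_emod_of_dvd T dvd_rfl, ← Int.sub_emod]

-- characterization of a fold that sets each index of a range once, reading only itself
lemma pv_foldSet_char (f : Int → Int → Int) :
    ∀ (k : Nat) (a b : Int) (ndp : List Int), 0 ≤ a → b ≤ (ndp.length : Int) → (b - a).toNat = k →
    (((PySem.List.pyRange a b 1).foldl
        (fun l j => PySem.List.pySetD l j (f j (PySem.List.pyGetD l j 0))) ndp).length = ndp.length ∧
     ∀ m : Nat, ((PySem.List.pyRange a b 1).foldl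
        (fun l j => PySem.List.pySetD l j (f j (PySem.List.pyGetD l j 0))) ndp).getD m 0 =
        if a ≤ (m:Int) ∧ (m:Int) < b then f m (ndp.getD m 0) else ndp.getD m 0) := by
  intro k
  induction k with
  | zero =>
    intro a b ndp ha hb hk
    have hba : b ≤ a := by omega
    rw [PySem.List.pyRange_one_eq_nil hba]
    refine ⟨rfl, ?_⟩
    intro m
    have hc : ¬ (a ≤ (m:Int) ∧ (m:Int) < b) := by omega
    simp [hc]
  | succ k ih =>
    intro a b ndp ha hb hk
    have hab : a < b := by omega
    have hta : (a.toNat : Int) = a := Int.toNat_of_nonneg ha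
    rw [PySem.List.pyRange_one_cons hab]
    simp only [List.foldl_cons]
    have hset : PySem.List.pySetD ndp a (f a (PySem.List.pyGetD ndp a 0))
        = ndp.set a.toNat (f a (PySem.List.pyGetD ndp a 0)) := PySem.List.pySetD_of_nonneg _ _ ha
    have hlen' : (PySem.List.pySetD ndp a (f a (PySem.List.pyGetD ndp a 0))).length = ndp.length := by
      rw [hset]; simp
    obtain ⟨ih1, ih2⟩ := ih (a+1) b (PySem.List.pySetD ndp a (f a (PySem.List.pyGetD ndp a 0)))
      (by omega) (by rw [hlen']; exact hb) (by omega)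
    refine ⟨by rw [ih1, hlen'], ?_⟩
    intro m
    rw [ih2 m]
    have hgd : ∀ mm : Nat, (PySem.List.pySetD ndp a (f a (PySem.List.pyGetD ndp a 0))).getD mm 0
        = if (mm:Int) = a then f a (ndp.getD mm 0) else ndp.getD mm 0 := by
      intro mm
      rw [hset]
      by_cases hma : (mm:Int) = a
      · have hm : a.toNat = mm := by omega
        have hlt : a.toNat < ndp.length := by omega
        have hget : PySem.List.pyGetD ndp a 0 = ndp.getD mm 0 := by
          rw [← hma]; simp
        rw [if_pos hma, hget, List.getD_eq_getElem?_getD, List.getElem?_set,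
          if_pos hm, if_pos hlt]
        simp [List.getD_eq_getElem?_getD]
      · have hm : a.toNat ≠ mm := by omega
        rw [if_neg hma, List.getD_eq_getElem?_getD, List.getElem?_set, if_neg hm,
          ← List.getD_eq_getElem?_getD]
    by_cases hma : (m:Int) = a
    · have c1 : ¬ (a + 1 ≤ (m:Int) ∧ (m:Int) < b) := by omega
      have c2 : a ≤ (m:Int) ∧ (m:Int) < b := by omega
      rw [if_neg c1, hgd m, if_pos hma, if_pos c2, hma]
    · have hiff : (a + 1 ≤ (m:Int) ∧ (m:Int) < b) ↔ (a ≤ (m:Int) ∧ (m:Int) < b) := by omega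
      rw [hgd m, if_neg hma]
      rw [show (if a + 1 ≤ (m:Int) ∧ (m:Int) < b then f (m:Int) (ndp.getD m 0) else ndp.getD m 0)
            = (if a ≤ (m:Int) ∧ (m:Int) < b then f (m:Int) (ndp.getD m 0) else ndp.getD m 0) from by
        by_cases h2 : a ≤ (m:Int) ∧ (m:Int) < b
        · rw [if_pos h2, if_pos (hiff.mpr h2)]
        · rw [if_neg h2, if_neg (fun hh => h2 (hiff.mp hh))]]

-- invariant of A's outer loop: after processing i = 0..c-1, entry m holds the partial sum over i < min c m
lemma pv_outerA (N : Int) (hN : 0 ≤ N) (dp : List Int) :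
    ∀ (c : Nat), (c:Int) ≤ N + 1 →
    (((PySem.List.pyRange 0 (c:Int) 1).foldl (fun ndp i =>
        (PySem.List.pyRange (i+1) (N+1) 1).foldl (fun n2 j =>
          PySem.List.pySetD n2 j (pvAdd (PySem.List.pyGetD n2 j 0) (pvOp (j - i) (PySem.List.pyGetD dp i 0)))) ndp)
        (List.replicate (N+1).toNat 0)).length = (N+1).toNat ∧
     ∀ m : Nat, m < (N+1).toNat →
       ((PySem.List.pyRange 0 (c:Int) 1).foldl (fun ndp i =>
        (PySem.List.pyRange (i+1) (N+1) 1).foldl (fun n2 j =>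
          PySem.List.pySetD n2 j (pvAdd (PySem.List.pyGetD n2 j 0) (pvOp (j - i) (PySem.List.pyGetD dp i 0)))) ndp)
        (List.replicate (N+1).toNat 0)).getD m 0
        = (∑ i ∈ Finset.range (min c m), (((m:Int) - (i:Int)) * dp.getD i 0)) % pvMod) := by
  intro c
  induction c with
  | zero =>
    intro _
    rw [show ((0:Nat):Int) = 0 from rfl, PySem.List.pyRange_one_eq_nil le_rfl]
    refine ⟨by simp, ?_⟩
    intro m _
    simp
  | succ c ih =>
    intro hc
    obtain ⟨ih1, ih2⟩ := ih (by omega)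
    have hcast : (((c+1:Nat)):Int) = (c:Int) + 1 := by push_cast; ring
    rw [hcast, PySem.List.pyRange_one_succ_right (by positivity), List.foldl_append,
      List.foldl_cons, List.foldl_nil]
    obtain ⟨f1, f2⟩ := pv_foldSet_char
      (fun j x => pvAdd x (pvOp (j - (c:Int)) (PySem.List.pyGetD dp (c:Int) 0)))
      ((N + 1 - ((c:Int)+1)).toNat) ((c:Int)+1) (N+1) _ (by omega) (by rw [ih1]; omega) rfl
    refine ⟨by rw [f1, ih1], ?_⟩
    intro m hm
    rw [f2 m]
    have hmN : (m:Int) < N + 1 := by omega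
    by_cases hcm : (c:Int) < (m:Int)
    · have hcond : ((c:Int)+1 ≤ (m:Int) ∧ (m:Int) < N+1) := by omega
      rw [if_pos hcond, ih2 m hm]
      have h1 : min c m = c := by omega
      have h2 : min (c+1) m = c + 1 := by omega
      rw [h1, h2, Finset.sum_range_succ]
      simp only [pvAdd, pvOp, pv_mod_eq, PySem.List.pyGetD_natCast]
      rw [pv_addm, pv_addm']
    · have hcond : ¬ ((c:Int)+1 ≤ (m:Int) ∧ (m:Int) < N+1) := by omega
      rw [if_neg hcond, ih2 m hm]
      have h1 : min c m = min (c+1) m := by omega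
      rw [h1]

-- A's layer computes pvE
lemma pv_layerA_char (N : Int) (hN : 0 ≤ N) (dp : List Int) :
    pvLayerA N dp = (List.range (N+1).toNat).map (fun m => pvE dp m) := by
  have hcast : (((N+1).toNat : Nat) : Int) = N + 1 := Int.toNat_of_nonneg (by omega)
  obtain ⟨h1, h2⟩ := pv_outerA N hN dp (N+1).toNat (by omega)
  rw [hcast] at h1 h2
  unfold pvLayerA
  apply List.ext_getElem
  · rw [h1]; simp
  · intro k hk hk'
    have hkN : k < (N+1).toNat := by rw [h1] at hk; exact hk
    rw [← List.getD_eq_getElem _ 0 hk, h2 k hkN]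
    simp only [List.getElem_map, List.getElem_range]
    rw [show min (N+1).toNat k = k from by omega]
    rfl

-- invariant of B's single pass: output prefix plus the two running sums
lemma pv_innerB (N : Int) (_hN : 0 ≤ N) (dp : List Int) :
    ∀ (c : Nat), (c:Int) ≤ N →
    (PySem.List.pyRange 1 ((c:Int)+1) 1).foldl (fun st j =>
        let s1 := PySem.Int.mod (st.2.1 + PySem.List.pyGetD dp (j-1) 0) pvMod
        let s2 := PySem.Int.mod (st.2.2 + (j-1) * PySem.List.pyGetD dp (j-1) 0) pvMod
        (st.1 ++ [PySem.Int.mod (j * s1 - s2) pvMod], s1, s2))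
      (([0], 0, 0) : List Int × Int × Int)
    = ((List.range (c+1)).map (fun m => pvE dp m), pvQ dp c, pvR dp c) := by
  intro c
  induction c with
  | zero =>
    intro _
    rw [show ((0:Nat):Int) + 1 = 1 from rfl, PySem.List.pyRange_one_eq_nil le_rfl]
    simp [pvE, pvQ, pvR]
  | succ c ih =>
    intro hc
    have hcast : (((c+1:Nat)):Int) + 1 = ((c:Int) + 1) + 1 := by push_cast; ring
    rw [hcast, PySem.List.pyRange_one_succ_right (by omega), List.foldl_append,
      ih (by omega), List.foldl_cons, List.foldl_nil]
    have hidx : ((c:Int) + 1) - 1 = ((c:Nat):Int) := by ring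
    have hs1 : PySem.Int.mod (pvQ dp c + PySem.List.pyGetD dp (((c:Int)+1)-1) 0) pvMod
        = pvQ dp (c+1) := by
      rw [hidx, PySem.List.pyGetD_natCast, pv_mod_eq]
      unfold pvQ
      rw [pv_addm, Finset.sum_range_succ]
    have hs2 : PySem.Int.mod (pvR dp c + (((c:Int)+1)-1) * PySem.List.pyGetD dp (((c:Int)+1)-1) 0) pvMod
        = pvR dp (c+1) := by
      rw [hidx, PySem.List.pyGetD_natCast, pv_mod_eq]
      unfold pvR
      rw [pv_addm, Finset.sum_range_succ]
    simp only [hs1, hs2]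
    have happ : PySem.Int.mod (((c:Int)+1) * pvQ dp (c+1) - pvR dp (c+1)) pvMod
        = pvE dp (c+1) := by
      rw [pv_mod_eq]
      unfold pvQ pvR pvE
      rw [pv_mulsub]
      congr 1
      rw [Finset.mul_sum, ← Finset.sum_sub_distrib]
      apply Finset.sum_congr rfl
      intro i _
      push_cast
      ring
    rw [happ]
    simp [List.range_succ]

-- B's layer computes pvE
lemma pv_layerB_char (N : Int) (hN : 0 ≤ N) (dp : List Int) :
    pvLayerB N dp = (List.range (N+1).toNat).map (fun m => pvE dp m) := by
  unfold pvLayerB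
  have hN1 : N + 1 = ((N.toNat : Nat) : Int) + 1 := by omega
  rw [hN1, pv_innerB N hN dp N.toNat (by omega),
    show (((N.toNat:Int)) + 1).toNat = N.toNat + 1 from by omega]

-- A's final loop computes prefix sums
lemma pv_prefA_char (N : Int) (hN : 0 ≤ N) (dp : List Int) :
    (PySem.List.pyRange 0 (N+1) 1).foldl (fun ret i =>
      PySem.List.pySetD ret i (pvAdd (PySem.List.pyGetD ret (i-1) 0) (PySem.List.pyGetD dp i 0)))
      (List.replicate (N+1).toNat 0)
    = (List.range (N+1).toNat).map (fun m => pvQ dp (m+1)) := by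
  have hinv : ∀ (c : Nat), (c:Int) ≤ N + 1 →
      (((PySem.List.pyRange 0 (c:Int) 1).foldl (fun ret i =>
        PySem.List.pySetD ret i (pvAdd (PySem.List.pyGetD ret (i-1) 0) (PySem.List.pyGetD dp i 0)))
        (List.replicate (N+1).toNat 0)).length = (N+1).toNat ∧
       ∀ m : Nat, m < (N+1).toNat →
        ((PySem.List.pyRange 0 (c:Int) 1).foldl (fun ret i =>
          PySem.List.pySetD ret i (pvAdd (PySem.List.pyGetD ret (i-1) 0) (PySem.List.pyGetD dp i 0)))
          (List.replicate (N+1).toNat 0)).getD m 0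
          = if m < c then pvQ dp (m+1) else 0) := by
    intro c
    induction c with
    | zero =>
      intro _
      rw [show ((0:Nat):Int) = 0 from rfl, PySem.List.pyRange_one_eq_nil le_rfl]
      refine ⟨by simp, ?_⟩
      intro m _
      simp
    | succ c ih =>
      intro hc
      obtain ⟨ih1, ih2⟩ := ih (by omega)
      have hcast : (((c+1:Nat)):Int) = (c:Int) + 1 := by push_cast; ring
      rw [hcast, PySem.List.pyRange_one_succ_right (by omega), List.foldl_append,
        List.foldl_cons, List.foldl_nil]
      set s := (PySem.List.pyRange 0 (c:Int) 1).foldl (fun ret i =>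
          PySem.List.pySetD ret i (pvAdd (PySem.List.pyGetD ret (i-1) 0) (PySem.List.pyGetD dp i 0)))
          (List.replicate (N+1).toNat 0) with hs
      have hsne : s ≠ [] := by
        intro h
        have := ih1
        rw [h] at this
        simp at this
        omega
      -- the value written at index c is pvQ dp (c+1)
      have hval : pvAdd (PySem.List.pyGetD s ((c:Int)-1) 0) (PySem.List.pyGetD dp (c:Int) 0)
          = pvQ dp (c+1) := by
        have hread : PySem.List.pyGetD s ((c:Int)-1) 0 = pvQ dp c := by
          rcases Nat.eq_zero_or_pos c with h0 | hpos
          · subst h0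
            rw [show ((0:Nat):Int) - 1 = -1 from rfl, PySem.List.pyGetD_neg_one s 0 hsne,
              List.getLast_eq_getElem, ← List.getD_eq_getElem _ 0]
            rw [ih2 (s.length - 1) (by omega)]
            rw [if_neg (by omega)]
            simp [pvQ]
          · have hc1 : ((c:Int)) - 1 = (((c-1:Nat)):Int) := by omega
            rw [hc1, PySem.List.pyGetD_natCast, ih2 (c-1) (by omega), if_pos (by omega),
              show c - 1 + 1 = c from by omega]
        rw [hread, PySem.List.pyGetD_natCast]
        unfold pvAdd pvQ
        rw [pv_mod_eq, pv_addm, Finset.sum_range_succ]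
      rw [hval, PySem.List.pySetD_natCast]
      have hclen : c < s.length := by rw [ih1]; omega
      refine ⟨by simp [ih1], ?_⟩
      intro m hm
      rw [List.getD_eq_getElem?_getD, List.getElem?_set]
      by_cases hmc : m = c
      · subst hmc
        rw [if_pos rfl, if_pos hclen]
        simp
      · rw [if_neg (fun h => hmc h.symm), ← List.getD_eq_getElem?_getD, ih2 m hm]
        by_cases h2 : m < c
        · rw [if_pos h2, if_pos (by omega)]
        · rw [if_neg h2, if_neg (by omega)]
  have hcast : (((N+1).toNat : Nat) : Int) = N + 1 := Int.toNat_of_nonneg (by omega)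
  obtain ⟨h1, h2⟩ := hinv (N+1).toNat (by omega)
  rw [hcast] at h1 h2
  apply List.ext_getElem
  · rw [h1]; simp
  · intro k hk hk'
    have hkN : k < (N+1).toNat := by rw [h1] at hk; exact hk
    rw [← List.getD_eq_getElem _ 0 hk, h2 k hkN, if_pos hkN]
    simp

-- B's final loop computes prefix sums
lemma pv_prefB_char (dp : List Int) :
    (dp.foldl (fun st v =>
        let acc := PySem.Int.mod (st.2 + v) pvMod
        (st.1 ++ [acc], acc)) (([], 0) : List Int × Int)).1
    = (List.range dp.length).map (fun m => pvQ dp (m+1)) := by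
  have hinv : ∀ (zs ys : List Int), dp = ys ++ zs →
      (zs.foldl (fun st v =>
          let acc := PySem.Int.mod (st.2 + v) pvMod
          (st.1 ++ [acc], acc))
        (((List.range ys.length).map (fun m => pvQ dp (m+1)), pvQ dp ys.length) : List Int × Int))
      = ((List.range dp.length).map (fun m => pvQ dp (m+1)), pvQ dp dp.length) := by
    intro zs
    induction zs with
    | nil =>
      intro ys h
      subst h
      simp
    | cons v zs' ih =>
      intro ys h
      rw [List.foldl_cons]
      have hv : dp.getD ys.length 0 = v := by
        subst h
        rw [List.getD_eq_getElem?_getD, List.getElem?_append_right le_rfl]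
        simp
      have hacc : PySem.Int.mod (pvQ dp ys.length + v) pvMod = pvQ dp (ys.length + 1) := by
        rw [pv_mod_eq]
        unfold pvQ
        rw [pv_addm, Finset.sum_range_succ, hv]
      simp only [hacc]
      have hmap : (List.range ys.length).map (fun m => pvQ dp (m+1)) ++ [pvQ dp (ys.length + 1)]
          = (List.range (ys ++ [v]).length).map (fun m => pvQ dp (m+1)) := by
        simp [List.range_succ]
      rw [hmap, show ys.length + 1 = (ys ++ [v]).length from by simp]
      exact ih (ys ++ [v]) (by simp [h])
  have h0 : (([], 0) : List Int × Int)
      = (((List.range ([]:List Int).length).map (fun m => pvQ dp (m+1)), pvQ dp ([]:List Int).length) : List Int × Int) := by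
    simp [pvQ]
  rw [h0, hinv dp [] (by simp)]

-- ===== VERDICT (by name: the statement is the Claim_ definition above) =====
theorem subnaive2_spec : Claim_equal_subnaive2 := by
  intro N _ hN
  have hN' : 0 ≤ N := hN
  unfold Spec_subnaive2
  have hlayers : (fun (dp : List Int) (_ : Nat) => pvLayerA N dp)
      = (fun (dp : List Int) (_ : Nat) => pvLayerB N dp) := by
    funext dp _
    rw [pv_layerA_char N hN' dp, pv_layerB_char N hN' dp]
  have hA : subnaive2 N = (PySem.List.pyRange 0 (N+1) 1).foldl (fun ret i =>
      PySem.List.pySetD ret i (pvAdd (PySem.List.pyGetD ret (i-1) 0)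
        (PySem.List.pyGetD ((List.range 5).foldl (fun dp _ => pvLayerA N dp)
          (PySem.List.pySetD (List.replicate (N+1).toNat 0) 0 1)) i 0)))
      (List.replicate (N+1).toNat 0) := rfl
  have hB : subnaive2_alt N = (((List.range 5).foldl (fun dp _ => pvLayerB N dp)
        (PySem.List.pySetD (List.replicate (N+1).toNat 0) 0 1)).foldl (fun st v =>
      let acc := PySem.Int.mod (st.2 + v) pvMod
      (st.1 ++ [acc], acc)) (([], 0) : List Int × Int)).1 := rfl
  set dpF := (List.range 5).foldl (fun dp _ => pvLayerB N dp)
      (PySem.List.pySetD (List.replicate (N+1).toNat 0) 0 1) with hdpF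
  have hlenF : dpF.length = (N+1).toNat := by
    rw [hdpF, show List.range 5 = List.range 4 ++ [4] from List.range_succ,
      List.foldl_append, List.foldl_cons, List.foldl_nil,
      pv_layerB_char N hN']
    simp
  rw [hA, hB, hlayers, ← hdpF, pv_prefA_char N hN' dpF, pv_prefB_char dpF, hlenF]
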